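-- pv_equiv track=rewrite | github.com/hitochan777/kata | atcoder/asakatsu/20221108/D.py | solve
-- ===== SOURCE A (Python) =====
-- def solve(N, K, S):
--   c = S.count("1")
--   ones = S[:K].count("1")
--   zeros = S[:K].count("0")
--   exists = False
--   if ones == c and zeros == 0:
--     exists = True
--
--   for i in range(1,N-K):
--     if S[i-1] == "1":
--       ones -= 1
--     elif S[i-1] == "0":
--       zeros -= 1
--
--     if S[i+K-1] == "1":
--       ones += 1
--     elif S[i+K-1] == "0":
--       zeros += 1
--
--     if ones == c and zeros == 0:
--       if exists:
--         return False
--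
--       exists = True
--
--   return exists
-- ===== SOURCE B (Python) =====
-- def solve(N, K, S):
--     c = S.count("1")
--     hits = 0
--     for i in range(max(1, N - K)):
--         w = S[i:i+K]
--         if w.count("0") == 0 and w.count("1") == c:
--             hits += 1
--     return hits == 1
-- ===== Notes on version B (the rewrite author's own statement) =====
-- stated objective: simpler
-- what changed: Replaces A's incremental sliding ones/zeros counters with early-return exists-flag by an independent per-window recount (slice each window, count its characters) and a plain 'number of qualifying windows == 1' check; Pre_ excludes inputs where A raises IndexError (loop reading past the string) or where A's loop runs with K <= 0 and its value comes from Python negative-index wraparound, an accident no caller would specify.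
-- outside the precondition, e.g. on solve(1, -3, '0001'): A returns True, B returns False; on solve(4, 1, '1'): A raises IndexError, B returns True
import Mathlib
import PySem

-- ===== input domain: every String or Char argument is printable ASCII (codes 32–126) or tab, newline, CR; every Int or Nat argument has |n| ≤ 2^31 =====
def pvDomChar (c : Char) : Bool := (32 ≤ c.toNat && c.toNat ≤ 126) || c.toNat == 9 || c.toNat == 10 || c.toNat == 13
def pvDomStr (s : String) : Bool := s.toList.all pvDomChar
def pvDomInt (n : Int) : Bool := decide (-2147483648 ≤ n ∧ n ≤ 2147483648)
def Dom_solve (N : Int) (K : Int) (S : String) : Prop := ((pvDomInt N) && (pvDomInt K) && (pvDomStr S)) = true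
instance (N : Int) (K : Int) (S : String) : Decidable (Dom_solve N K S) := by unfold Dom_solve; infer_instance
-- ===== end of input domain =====

-- B replaces A's incremental sliding ones/zeros counters and early-return exists-flag by an
-- independent per-window recount over each slice and a 'qualifying windows == 1' check
-- (objective: simpler). Equivalence is over the return value only.

-- ===== PORT A =====
-- A's for-loop with early `return False`: structural recursion over the index list,
-- state (ones, zeros, exists).  S[i] is `pyGetD` (in range under Pre_solve).
def solveLoop (L : List Char) (c K : Int) : List Int → Int → Int → Bool → Bool
  | [], _, _, ex => ex
  | i :: rest, ones, zeros, ex =>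
    let a := PySem.List.pyGetD L (i - 1) ' '
    let ones1 := if a = '1' then ones - 1 else ones
    let zeros1 := if a = '1' then zeros else if a = '0' then zeros - 1 else zeros
    let b := PySem.List.pyGetD L (i + K - 1) ' '
    let ones2 := if b = '1' then ones1 + 1 else ones1
    let zeros2 := if b = '1' then zeros1 else if b = '0' then zeros1 + 1 else zeros1
    if ones2 = c ∧ zeros2 = 0 then
      if ex then false else solveLoop L c K rest ones2 zeros2 true
    else solveLoop L c K rest ones2 zeros2 ex

def solve (N : Int) (K : Int) (S : String) : Bool :=
  let L := S.toList
  let c : Int := (PySem.Chars.count L ['1'] : Int)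
  let ones : Int := (PySem.Chars.count (PySem.List.slice L none (some K)) ['1'] : Int)
  let zeros : Int := (PySem.Chars.count (PySem.List.slice L none (some K)) ['0'] : Int)
  let ex : Bool := decide (ones = c ∧ zeros = 0)
  solveLoop L c K (PySem.List.pyRange 1 (N - K) 1) ones zeros ex

-- ===== PORT B =====
-- does the window w = S[i:i+K] contain no '0' and all of S's ones?
def winOk (L : List Char) (c K : Int) (i : Int) : Bool :=
  let w := PySem.List.slice L (some i) (some (i + K))
  decide ((PySem.Chars.count w ['0'] : Int) = 0 ∧ (PySem.Chars.count w ['1'] : Int) = c)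

def solve_alt (N : Int) (K : Int) (S : String) : Bool :=
  let L := S.toList
  let c : Int := (PySem.Chars.count L ['1'] : Int)
  let hits : Nat := (PySem.List.pyRange 0 (max 1 (N - K)) 1).countP (fun i => winOk L c K i)
  decide (hits = 1)

-- ===== PRECONDITION & SPEC =====
-- Pre_ excludes exactly the inputs on which A's sliding loop runs (N - K ≥ 2) while either
-- reading past the end of S (N > len(S)+1: A raises IndexError) or running with K ≤ 0
-- (A's S[i+K-1] reads via negative-index wraparound, an accident of Python indexing
-- no caller of this contest solver would specify).
def Pre_solve (N : Int) (K : Int) (S : String) : Prop :=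
  N - K ≤ 1 ∨ (1 ≤ K ∧ N ≤ PySem.Str.len S + 1)
instance (N : Int) (K : Int) (S : String) : Decidable (Pre_solve N K S) := by
  unfold Pre_solve; infer_instance

def pvWitness_solve : Int × Int × String := (4, 2, "0110")

def Spec_solve (N : Int) (K : Int) (S : String) (out : Bool) : Prop := out = solve_alt N K S
instance (N : Int) (K : Int) (S : String) (out : Bool) : Decidable (Spec_solve N K S out) := by
  unfold Spec_solve; infer_instance

-- ===== CLAIM (what is proved, stated in full; the proofs are below) =====
def Claim_equal_solve : Prop := ∀ (N : Int) (K : Int) (S : String), Dom_solve N K S → Pre_solve N K S → Spec_solve N K S (solve N K S)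

-- ===== LEMMAS AND PROOFS =====

lemma go_succ (c x : Char) (t : List Char) (n acc : Nat) :
    PySem.Chars.count.go [c] (n+1) (x::t) acc
      = if c = x then PySem.Chars.count.go [c] n t (acc+1) else PySem.Chars.count.go [c] n t acc := by
  rw [PySem.Chars.count.go]
  simp [List.isPrefixOf]

lemma go_nil (c : Char) (n acc : Nat) : PySem.Chars.count.go [c] n [] acc = acc := by
  cases n <;> (rw [PySem.Chars.count.go]; try omega)

lemma count_go_single (c : Char) : ∀ (fuel : Nat) (l : List Char) (acc : Nat),
    l.length ≤ fuel → PySem.Chars.count.go [c] fuel l acc = acc + l.count c := by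
  intro fuel
  induction fuel with
  | zero => intro l acc h; cases l with
            | nil => simp [go_nil]
            | cons x t => simp at h
  | succ n ih =>
    intro l acc h
    cases l with
    | nil => simp [go_nil]
    | cons x t =>
      rw [go_succ]
      simp only [List.length_cons] at h
      by_cases hx : c = x
      · rw [if_pos hx, ih _ _ (by omega), List.count_cons]
        simp [hx]; omega
      · rw [if_neg hx, ih _ _ (by omega), List.count_cons]
        have : ¬ (x = c) := fun e => hx e.symm
        simp [this]

lemma count_single (c : Char) (l : List Char) :
    PySem.Chars.count l [c] = l.count c := by
  rw [PySem.Chars.count]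
  simp [count_go_single c l.length l 0 le_rfl]

lemma slide (L : List Char) (k j : Nat) (c : Char) (hk : 1 ≤ k) (hjk : j + k < L.length) :
    ((L.drop (j+1)).take k).count c + (if L[j]'(by omega) = c then 1 else 0)
      = ((L.drop j).take k).count c + (if L[j+k]'(by omega) = c then 1 else 0) := by
  obtain ⟨k', rfl⟩ : ∃ k', k = k' + 1 := ⟨k - 1, by omega⟩
  have hdj : L.drop j = L[j]'(by omega) :: L.drop (j+1) := List.drop_eq_getElem_cons (by omega)
  have hlen : k' < (L.drop (j+1)).length := by simp [List.length_drop]; omega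
  have hget : (L.drop (j+1))[k']'hlen = L[j+(k'+1)]'(by omega) := by
    rw [List.getElem_drop]; congr 1; omega
  have h1 : ((L.drop j).take (k'+1)).count c
      = (if L[j]'(by omega) = c then 1 else 0) + ((L.drop (j+1)).take k').count c := by
    rw [hdj, List.take_succ_cons, List.count_cons]
    by_cases h : L[j]'(by omega) = c <;> simp [h] <;> omega
  have h2 : ((L.drop (j+1)).take (k'+1)).count c
      = ((L.drop (j+1)).take k').count c + (if L[j+(k'+1)]'(by omega) = c then 1 else 0) := by
    rw [List.take_add_one, List.getElem?_eq_getElem hlen]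
    simp [List.count_append, hget]
    by_cases h : L[j+(k'+1)]'(by omega) = c <;> simp [h]
  rw [h1, h2]; omega

-- the window test recomputed from the slice equals the segment counts
lemma winOk_eq (L : List Char) (c K i : Int) (h0 : 0 ≤ i) (hK : 0 ≤ K) :
    winOk L c K i
      = decide ((((L.drop i.toNat).take K.toNat).count '0' : Int) = 0 ∧
                (((L.drop i.toNat).take K.toNat).count '1' : Int) = c) := by
  obtain ⟨a, rfl⟩ : ∃ a : Nat, i = (a : Int) := ⟨i.toNat, by omega⟩
  obtain ⟨k, rfl⟩ : ∃ k : Nat, K = (k : Int) := ⟨K.toNat, by omega⟩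
  rw [winOk, PySem.List.slice_natCast_add, count_single, count_single]
  simp [Int.toNat_natCast]

lemma winOk_zero (L : List Char) (c K : Int) :
    winOk L c K 0
      = decide ((PySem.Chars.count (PySem.List.slice L none (some K)) ['1'] : Int) = c ∧
                (PySem.Chars.count (PySem.List.slice L none (some K)) ['0'] : Int) = 0) := by
  rw [winOk]
  rw [show (0 : Int) + K = K from by omega, PySem.List.slice_zero_start]
  rw [decide_eq_decide]
  tauto

lemma loopA_eq (L : List Char) (c K N : Int) (hK : 1 ≤ K) (hN : N ≤ (L.length : Int) + 1) :
    ∀ (m : Nat) (i : Int), i = N - K - m → 1 ≤ i →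
    ∀ (ones zeros : Int) (ex : Bool),
      ones = (((L.drop (i-1).toNat).take K.toNat).count '1' : Int) →
      zeros = (((L.drop (i-1).toNat).take K.toNat).count '0' : Int) →
      solveLoop L c K (PySem.List.pyRange i (N - K) 1) ones zeros ex
        = decide ((cond ex 1 0) + (PySem.List.pyRange i (N - K) 1).countP (fun j => winOk L c K j) = 1) := by
  intro m
  induction m with
  | zero =>
    intro i hi h1 ones zeros ex ho hz
    rw [PySem.List.pyRange_one_eq_nil (by omega)]
    cases ex <;> simp [solveLoop]
  | succ m ih =>
    intro i hi h1 ones zeros ex ho hz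
    obtain ⟨j, rfl⟩ : ∃ j : Nat, i = (j:Int)+1 := ⟨(i-1).toNat, by omega⟩
    have hn1 : ((j:Int)+1-1).toNat = j := by omega
    have hn2 : ((j:Int)+1).toNat = j+1 := by omega
    have hn3 : ((j:Int)+1+K-1).toNat = j + K.toNat := by omega
    have hjk : j + K.toNat < L.length := by omega
    have ha : PySem.List.pyGetD L ((j:Int)+1-1) ' ' = L[j]'(by omega) := by
      rw [PySem.List.pyGetD_eq_getElem L ' ' (by omega) (by omega)]
      simp only [hn1]
    have hb : PySem.List.pyGetD L ((j:Int)+1+K-1) ' ' = L[j + K.toNat]'(by omega) := by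
      rw [PySem.List.pyGetD_eq_getElem L ' ' (by omega) (by omega)]
      simp only [hn3]
    simp only [hn1] at ho hz
    have hslide1 := slide L K.toNat j '1' (by omega) hjk
    have hslide0 := slide L K.toNat j '0' (by omega) hjk
    have e1 : (if L[j + K.toNat]'(by omega) = '1' then (if L[j]'(by omega) = '1' then ones - 1 else ones) + 1
               else if L[j]'(by omega) = '1' then ones - 1 else ones)
            = ((List.count '1' (List.take K.toNat (List.drop (j+1) L)) : Nat) : Int) := by
      subst ho
      by_cases hx : L[j]'(by omega) = '1' <;>
        by_cases hy : L[j + K.toNat]'(by omega) = '1' <;>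
          simp [hx, hy] at hslide1 ⊢ <;> omega
    have e0 : (if L[j + K.toNat]'(by omega) = '1' then
                 (if L[j]'(by omega) = '1' then zeros else if L[j]'(by omega) = '0' then zeros - 1 else zeros)
               else if L[j + K.toNat]'(by omega) = '0' then
                 (if L[j]'(by omega) = '1' then zeros else if L[j]'(by omega) = '0' then zeros - 1 else zeros) + 1
               else (if L[j]'(by omega) = '1' then zeros else if L[j]'(by omega) = '0' then zeros - 1 else zeros))
            = ((List.count '0' (List.take K.toNat (List.drop (j+1) L)) : Nat) : Int) := by
      subst hz
      by_cases hx : L[j]'(by omega) = '1' <;>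
        by_cases hx0 : L[j]'(by omega) = '0' <;>
          by_cases hy : L[j + K.toNat]'(by omega) = '1' <;>
            by_cases hy0 : L[j + K.toNat]'(by omega) = '0' <;>
              first
              | (exfalso; rw [hx] at hx0; exact absurd hx0 (by decide))
              | (exfalso; rw [hy] at hy0; exact absurd hy0 (by decide))
              | (simp [hx, hx0, hy, hy0] at hslide0 ⊢ <;> omega)
    rw [PySem.List.pyRange_one_cons (by omega)]
    simp only [solveLoop, ha, hb, e1, e0]
    have hIH := fun ex => ih ((j:Int)+1+1) (by push_cast; push_cast at hi; omega) (by omega)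
        ((List.count '1' (List.take K.toNat (List.drop (j+1) L)) : Nat) : Int)
        ((List.count '0' (List.take K.toNat (List.drop (j+1) L)) : Nat) : Int) ex
        (by simp only [show ((j:Int)+1+1-1).toNat = j+1 from by omega])
        (by simp only [show ((j:Int)+1+1-1).toNat = j+1 from by omega])
    have hw : winOk L c K ((j:Int)+1)
        = decide ((((L.drop (j+1)).take K.toNat).count '0' : Int) = 0 ∧
                  (((L.drop (j+1)).take K.toNat).count '1' : Int) = c) := by
      rw [winOk_eq L c K ((j:Int)+1) (by omega) (by omega)]
      simp only [hn2]
    rw [List.countP_cons]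
    simp only [hw]
    set p : Nat := (PySem.List.pyRange ((j:Int)+1+1) (N - K)).countP (fun x => winOk L c K x) with hp
    set n1 : Nat := List.count '1' (List.take K.toNat (List.drop (j+1) L)) with hn1'
    set n0 : Nat := List.count '0' (List.take K.toNat (List.drop (j+1) L)) with hn0'
    by_cases hok : ((n1:Int) = c ∧ (n0:Int) = 0)
    · rw [if_pos hok]
      cases ex with
      | true =>
        simp only []
        have : decide ((n0:Int) = 0 ∧ (n1:Int) = c) = true := by simp [hok.1, hok.2]
        rw [this]
        simp
      | false =>
        simp only [Bool.false_eq_true]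
        rw [hIH true]
        have : decide ((n0:Int) = 0 ∧ (n1:Int) = c) = true := by simp [hok.1, hok.2]
        rw [this]
        simp only [cond_true, cond_false, if_true, if_false, Bool.false_eq_true]
        rw [decide_eq_decide]
        omega
    · rw [if_neg hok]
      rw [hIH ex]
      have : decide ((n0:Int) = 0 ∧ (n1:Int) = c) = false := by
        simp only [decide_eq_false_iff_not]
        tauto
      rw [this]
      cases ex <;>
        simp only [cond_true, cond_false, if_true, if_false, Bool.false_eq_true] <;>
        (rw [decide_eq_decide]; omega)

theorem solve_spec' : ∀ (N : Int) (K : Int) (S : String), Pre_solve N K S →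
    solve N K S = solve_alt N K S := by
  intro N K S hpre
  simp only [solve, solve_alt]
  by_cases h2 : N - K ≤ 1
  · rw [PySem.List.pyRange_one_eq_nil (by omega)]
    have hm : max 1 (N - K) = 1 := by omega
    rw [hm, show (PySem.List.pyRange 0 1 : List Int) = [0] from by decide]
    simp only [solveLoop, List.countP_cons, List.countP_nil, winOk_zero]
    by_cases hok : ((PySem.Chars.count (PySem.List.slice S.toList none (some K)) ['1'] : Int) =
                      (PySem.Chars.count S.toList ['1'] : Int) ∧
                    (PySem.Chars.count (PySem.List.slice S.toList none (some K)) ['0'] : Int) = 0) <;>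
      simp [hok]
  · obtain ⟨hK, hN⟩ : 1 ≤ K ∧ N ≤ (S.toList.length : Int) + 1 := by
      rcases hpre with h | h
      · omega
      · exact ⟨h.1, by simpa [PySem.Str.len_eq] using h.2⟩
    have hm : max 1 (N - K) = N - K := by omega
    rw [hm, PySem.List.pyRange_one_cons (show (0:Int) < N - K by omega)]
    have hs : PySem.List.slice S.toList none (some K) = S.toList.take K.toNat :=
      PySem.List.slice_to _ (by omega)
    have ho : (PySem.Chars.count (PySem.List.slice S.toList none (some K)) ['1'] : Int)
        = ((List.count '1' (List.take K.toNat (List.drop ((1:Int)-1).toNat S.toList)) : Nat) : Int) := by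
      rw [hs, count_single]; norm_num
    have hz : (PySem.Chars.count (PySem.List.slice S.toList none (some K)) ['0'] : Int)
        = ((List.count '0' (List.take K.toNat (List.drop ((1:Int)-1).toNat S.toList)) : Nat) : Int) := by
      rw [hs, count_single]; norm_num
    rw [loopA_eq S.toList (PySem.Chars.count S.toList ['1'] : Int) K N hK hN
        (N - K - 1).toNat 1 (by omega) (by omega) _ _ _ ho hz]
    rw [List.countP_cons, winOk_zero]
    rw [decide_eq_decide]
    simp only [Nat.cast_inj, Nat.cast_eq_zero]
    by_cases hok : (PySem.Chars.count (PySem.List.slice S.toList none (some K)) ['1'] =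
                      PySem.Chars.count S.toList ['1'] ∧
                    PySem.Chars.count (PySem.List.slice S.toList none (some K)) ['0'] = 0)
    · simp [hok]
    · simp [hok]

-- ===== VERDICT (by name: the statement is the Claim_ definition above) =====
theorem solve_spec : Claim_equal_solve := by
  intro N K S _ hpre
  unfold Spec_solve
  exact solve_spec' N K S hpre
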